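-- pv_equiv track=rewrite | github.com/m-ahsan-nazer/aoc2021 | day5.py | get_vent_boundaries
-- ===== SOURCE A (Python) =====
-- from typing import NewType, List, Tuple
--
-- def get_vent_boundaries(dic: dict) -> List[Tuple[int, int]]:
--     """
--     A---B
--     |   |
--     D---C
--     return: [A, B, C, D]
--     """
--     x_coords = []
--     y_coords = []
--     for info in dic:
--         tail_head = info["th"]
--         tail, head = tail_head
--         x, y = tail
--         x_coords.append(x)
--         y_coords.append(y)
--         x, y = head
--         x_coords.append(x)
--         y_coords.append(y)
--
--     x_min = min(x_coords)
--     y_min = min(y_coords)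
--     x_max = max(x_coords)
--     y_max = max(y_coords)
--     A = (x_min, y_min)
--     B = (x_max, y_min)
--     C = (x_max, y_max)
--     D = (x_min, y_max)
--
--     return [A, B, C, D]
-- ===== SOURCE B (Python) =====
-- def get_vent_boundaries(dic):
--     """Single pass maintaining running x/y min/max instead of building
--     coordinate lists and calling min/max four times."""
--     it = iter(dic)
--     try:
--         first = next(it)
--     except StopIteration:
--         raise ValueError("get_vent_boundaries: no segments")
--     (tx, ty), (hx, hy) = first["th"]
--     x_min, x_max = min(tx, hx), max(tx, hx)
--     y_min, y_max = min(ty, hy), max(ty, hy)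
--     for info in it:
--         (tx, ty), (hx, hy) = info["th"]
--         x_min = min(x_min, tx, hx)
--         x_max = max(x_max, tx, hx)
--         y_min = min(y_min, ty, hy)
--         y_max = max(y_max, ty, hy)
--     return [(x_min, y_min), (x_max, y_min), (x_max, y_max), (x_min, y_max)]
-- ===== Notes on version B (the rewrite author's own statement) =====
-- stated objective: simpler
-- what changed: Replaces the two accumulated coordinate lists and four separate min/max list passes with a single loop that maintains running x_min/x_max/y_min/y_max, initialized from the first entry.
import Mathlib
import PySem

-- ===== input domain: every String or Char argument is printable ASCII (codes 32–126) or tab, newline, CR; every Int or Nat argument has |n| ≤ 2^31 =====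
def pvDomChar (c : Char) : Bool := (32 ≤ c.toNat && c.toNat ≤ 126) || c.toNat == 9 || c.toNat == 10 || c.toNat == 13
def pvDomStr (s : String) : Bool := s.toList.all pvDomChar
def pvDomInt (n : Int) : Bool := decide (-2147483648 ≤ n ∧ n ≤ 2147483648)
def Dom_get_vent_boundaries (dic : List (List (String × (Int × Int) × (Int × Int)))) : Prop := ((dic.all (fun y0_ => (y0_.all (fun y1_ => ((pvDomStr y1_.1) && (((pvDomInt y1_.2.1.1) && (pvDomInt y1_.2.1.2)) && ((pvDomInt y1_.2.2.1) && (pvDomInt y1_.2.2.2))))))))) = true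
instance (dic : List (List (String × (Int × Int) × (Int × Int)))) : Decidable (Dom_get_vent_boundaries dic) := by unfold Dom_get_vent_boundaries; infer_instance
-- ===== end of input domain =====

-- B replaces A's two coordinate lists and four min/max list passes with one loop
-- keeping running x/y min/max (objective: simpler, O(1) extra space).

-- ===== PORT A =====
-- info["th"]: dict lookup, first match; Pre_ guarantees the key is present.
def pvLookTh (info : List (String × (Int × Int) × (Int × Int))) : (Int × Int) × (Int × Int) :=
  (List.lookup "th" info).getD ((0, 0), (0, 0))

def get_vent_boundaries (dic : List (List (String × (Int × Int) × (Int × Int)))) : List (Int × Int) :=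
  -- the loop appending tail then head coordinates to x_coords / y_coords
  let acc := dic.foldl
    (fun (p : List Int × List Int) info =>
      let th := pvLookTh info
      let tail := th.1
      let head := th.2
      (p.1 ++ [tail.1] ++ [head.1], p.2 ++ [tail.2] ++ [head.2]))
    ([], [])
  -- min()/max() on the lists; Pre_ guarantees nonemptiness (Python raises ValueError on [])
  let x_min := (PySem.List.min? acc.1 (fun v => v)).getD 0
  let y_min := (PySem.List.min? acc.2 (fun v => v)).getD 0
  let x_max := (PySem.List.max? acc.1 (fun v => v)).getD 0
  let y_max := (PySem.List.max? acc.2 (fun v => v)).getD 0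
  [(x_min, y_min), (x_max, y_min), (x_max, y_max), (x_min, y_max)]

-- ===== PORT B =====
def get_vent_boundaries_alt (dic : List (List (String × (Int × Int) × (Int × Int)))) : List (Int × Int) :=
  match dic with
  | [] => []   -- Python B raises ValueError here; Pre_ excludes the empty input
  | first :: rest =>
    let th := pvLookTh first
    let s0 : Int × Int × Int × Int :=
      (min th.1.1 th.2.1, max th.1.1 th.2.1, min th.1.2 th.2.2, max th.1.2 th.2.2)
    let s := rest.foldl
      (fun (s : Int × Int × Int × Int) info =>
        let th := pvLookTh info
        (min (min s.1 th.1.1) th.2.1, max (max s.2.1 th.1.1) th.2.1,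
         min (min s.2.2.1 th.1.2) th.2.2, max (max s.2.2.2 th.1.2) th.2.2)) s0
    [(s.1, s.2.2.1), (s.2.1, s.2.2.1), (s.2.1, s.2.2.2), (s.1, s.2.2.2)]

-- ===== PRECONDITION & SPEC =====
-- Pre_ excludes the empty list (Python min([]) raises ValueError) and entries
-- without a "th" key (Python raises KeyError); A raises on exactly those inputs.
def Pre_get_vent_boundaries (dic : List (List (String × (Int × Int) × (Int × Int)))) : Prop :=
  dic ≠ [] ∧ ∀ info ∈ dic, (List.lookup "th" info).isSome = true
instance (dic : List (List (String × (Int × Int) × (Int × Int)))) : Decidable (Pre_get_vent_boundaries dic) := by unfold Pre_get_vent_boundaries; infer_instance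

def pvWitness_get_vent_boundaries : (List (List (String × (Int × Int) × (Int × Int)))) :=
  [[("th", (1, 2), (3, 0))], [("th", (-1, 5), (2, 2))]]

def Spec_get_vent_boundaries (dic : List (List (String × (Int × Int) × (Int × Int)))) (out : List (Int × Int)) : Prop := out = get_vent_boundaries_alt dic
instance (dic : List (List (String × (Int × Int) × (Int × Int)))) (out : List (Int × Int)) : Decidable (Spec_get_vent_boundaries dic out) := by unfold Spec_get_vent_boundaries; infer_instance

-- ===== CLAIM (what is proved, stated in full; the proofs are below) =====
def Claim_equal_get_vent_boundaries : Prop := ∀ (dic : List (List (String × (Int × Int) × (Int × Int)))), Dom_get_vent_boundaries dic → Pre_get_vent_boundaries dic → Spec_get_vent_boundaries dic (get_vent_boundaries dic)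

-- ===== LEMMAS AND PROOFS =====

-- A's accumulated coordinate lists, as flatMaps
theorem pvAccA (dic : List (List (String × (Int × Int) × (Int × Int))))
    (xs ys : List Int) :
    dic.foldl
      (fun (p : List Int × List Int) info =>
        let th := pvLookTh info
        let tail := th.1
        let head := th.2
        (p.1 ++ [tail.1] ++ [head.1], p.2 ++ [tail.2] ++ [head.2]))
      (xs, ys)
    = (xs ++ dic.flatMap (fun i => [(pvLookTh i).1.1, (pvLookTh i).2.1]),
       ys ++ dic.flatMap (fun i => [(pvLookTh i).1.2, (pvLookTh i).2.2])) := by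
  induction dic generalizing xs ys with
  | nil => simp
  | cons h t ih =>
    simp only [List.foldl_cons]
    rw [ih]
    simp

-- folding min over the flattened pair list = per-entry double-min fold
theorem pvFoldMinFlat (f g : List (String × (Int × Int) × (Int × Int)) → Int)
    (l : List (List (String × (Int × Int) × (Int × Int)))) (a : Int) :
    (l.flatMap (fun i => [f i, g i])).foldl min a
    = l.foldl (fun a i => min (min a (f i)) (g i)) a := by
  induction l generalizing a with
  | nil => rfl
  | cons h t ih =>
    simp only [List.flatMap_cons, List.cons_append, List.foldl_cons]
    exact ih _

theorem pvFoldMaxFlat (f g : List (String × (Int × Int) × (Int × Int)) → Int)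
    (l : List (List (String × (Int × Int) × (Int × Int)))) (a : Int) :
    (l.flatMap (fun i => [f i, g i])).foldl max a
    = l.foldl (fun a i => max (max a (f i)) (g i)) a := by
  induction l generalizing a with
  | nil => rfl
  | cons h t ih =>
    simp only [List.flatMap_cons, List.cons_append, List.foldl_cons]
    exact ih _

-- B's 4-component fold is the product of the four scalar folds
theorem pvBFold (rest : List (List (String × (Int × Int) × (Int × Int))))
    (a b c d : Int) :
    rest.foldl
      (fun (s : Int × Int × Int × Int) info =>
        let th := pvLookTh info
        (min (min s.1 th.1.1) th.2.1, max (max s.2.1 th.1.1) th.2.1,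
         min (min s.2.2.1 th.1.2) th.2.2, max (max s.2.2.2 th.1.2) th.2.2))
      (a, b, c, d)
    = (rest.foldl (fun a i => min (min a (pvLookTh i).1.1) (pvLookTh i).2.1) a,
       rest.foldl (fun a i => max (max a (pvLookTh i).1.1) (pvLookTh i).2.1) b,
       rest.foldl (fun a i => min (min a (pvLookTh i).1.2) (pvLookTh i).2.2) c,
       rest.foldl (fun a i => max (max a (pvLookTh i).1.2) (pvLookTh i).2.2) d) := by
  induction rest generalizing a b c d with
  | nil => rfl
  | cons h t ih =>
    simp only [List.foldl_cons]
    exact ih _ _ _ _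

-- ===== VERDICT (by name: the statement is the Claim_ definition above) =====
theorem get_vent_boundaries_spec : Claim_equal_get_vent_boundaries := by
  intro dic _ hpre
  unfold Spec_get_vent_boundaries
  obtain ⟨hne, -⟩ := hpre
  match dic with
  | [] => exact absurd rfl hne
  | first :: rest =>
    unfold get_vent_boundaries get_vent_boundaries_alt
    simp only [List.foldl_cons, pvAccA, List.nil_append]
    simp only [List.cons_append, List.nil_append,
      PySem.List.min?_id_cons, PySem.List.max?_id_cons, Option.getD_some,
      List.foldl_cons, pvBFold, pvFoldMinFlat, pvFoldMaxFlat]
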